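-- pv_equiv track=rewrite | github.com/MagDenBT/AutoBackupPG | PostgreSQLBackuper.py | optimize_remove_list_dir
-- ===== SOURCE A (Python) =====
-- def optimize_remove_list_dir(empty_dirs):
--     empty_dirs = set(empty_dirs)
--     result = empty_dirs.copy()
--     for i, sought in enumerate(empty_dirs):
--         for z, target in enumerate(empty_dirs):
--             if z == i:
--                 continue
--             if target.startswith(sought):
--                 try:
--                     result.remove(target)
--                 except KeyError:
--                     continue
--     return result
-- ===== SOURCE B (Python) =====
-- def optimize_remove_list_dir(empty_dirs):
--     # Keep exactly the dirs none of whose proper prefixes is itself in the set.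
--     dirs = set(empty_dirs)
--     return {d for d in dirs if all(d[:k] not in dirs for k in range(len(d)))}
-- ===== Notes on version B (the rewrite author's own statement) =====
-- stated objective: faster
-- what changed: A compares every pair of distinct dirs with startswith (quadratic in the number of dirs); B makes a single pass that tests each dir's proper prefixes for membership in a hash set, so the pairwise scan disappears.
import Mathlib
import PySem

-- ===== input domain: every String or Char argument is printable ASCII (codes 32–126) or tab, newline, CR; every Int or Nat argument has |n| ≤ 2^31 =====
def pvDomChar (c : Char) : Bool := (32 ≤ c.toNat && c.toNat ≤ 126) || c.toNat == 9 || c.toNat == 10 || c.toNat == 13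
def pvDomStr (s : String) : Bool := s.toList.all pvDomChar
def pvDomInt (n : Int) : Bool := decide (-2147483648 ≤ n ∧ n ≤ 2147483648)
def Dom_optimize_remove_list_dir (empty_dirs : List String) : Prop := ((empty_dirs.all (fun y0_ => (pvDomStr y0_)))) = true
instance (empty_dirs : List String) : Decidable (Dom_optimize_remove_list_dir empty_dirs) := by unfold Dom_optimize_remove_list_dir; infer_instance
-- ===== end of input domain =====

-- B replaces A's quadratic pairwise startswith scan by one pass testing each dir's proper
-- prefixes for set membership; return value only (a Python set, order-insensitive).

-- ===== PORT A =====
-- A: result = set(empty_dirs); for each pair of distinct positions, remove target if it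
-- startswith sought (KeyError on an already-removed target is swallowed = no change).
def optimize_remove_list_dir (empty_dirs : List String) : List String :=
  (PySem.List.enumerate (PySem.Set.ofList empty_dirs) 0).foldl
    (fun result p =>
      (PySem.List.enumerate (PySem.Set.ofList empty_dirs) 0).foldl
        (fun result q =>
          if q.1 = p.1 then result
          else if PySem.Str.startswith q.2 p.2 then
            match PySem.Set.remove? result q.2 with
            | some r => r
            | none => result
          else result)
        result)
    (PySem.Set.ofList empty_dirs)

-- ===== PORT B =====
-- B: keep d iff no proper prefix d[:k] (k < len(d)) is itself in the set.
def optimize_remove_list_dir_alt (empty_dirs : List String) : List String :=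
  (PySem.Set.ofList empty_dirs).filter
    (fun d =>
      (PySem.List.pyRange 0 (PySem.Str.len d) 1).all
        (fun k => !(PySem.Set.contains (PySem.Set.ofList empty_dirs) (PySem.Str.slice d none (some k)))))

-- ===== PRECONDITION & SPEC =====
def Spec_optimize_remove_list_dir (empty_dirs : List String) (out : List String) : Prop := out = optimize_remove_list_dir_alt empty_dirs
instance (empty_dirs : List String) (out : List String) : Decidable (Spec_optimize_remove_list_dir empty_dirs out) := by unfold Spec_optimize_remove_list_dir; infer_instance

-- ===== CLAIM (what is proved, stated in full; the proofs are below) =====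
def Claim_equal_optimize_remove_list_dir : Prop := ∀ (empty_dirs : List String), Dom_optimize_remove_list_dir empty_dirs → Spec_optimize_remove_list_dir empty_dirs (optimize_remove_list_dir empty_dirs)

-- ===== LEMMAS AND PROOFS =====

-- Python's try: result.remove(target) / except KeyError: pass — remove if present.
theorem pv_rem_eq (r : List String) (t : String) :
    (match PySem.Set.remove? r t with | some x => x | none => r)
      = if t ∈ r then PySem.Set.discard r t else r := by
  by_cases h : t ∈ r
  · rw [PySem.Set.remove?_of_mem h]; simp [h]
  · rw [(PySem.Set.remove?_eq_none_iff r t).mpr h]; simp [h]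

theorem pv_ite_discard (r : List String) (t : String) :
    (if t ∈ r then PySem.Set.discard r t else r) = r.filter (fun y => !(y == t)) := by
  by_cases h : t ∈ r
  · simp only [if_pos h]
    unfold PySem.Set.discard
    rfl
  · rw [if_neg h]
    refine (List.filter_eq_self.mpr ?_).symm
    intro x hx
    simp only [Bool.not_eq_eq_eq_not, Bool.not_true, beq_eq_false_iff_ne]
    exact fun e => h (e ▸ hx)

-- a fold over enumerate whose body ignores the index is a fold over the list
theorem pv_foldl_enumerate_snd {α β : Type} (f : β → α → β) :
    ∀ (L : List α) (s : Int) (r : β),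
      (PySem.List.enumerate L s).foldl (fun acc q => f acc q.2) r = L.foldl f r := by
  intro L
  induction L with
  | nil => intro s r; rfl
  | cons x xs ih =>
      intro s r
      rw [PySem.List.enumerate_cons]
      simp only [List.foldl_cons]
      exact ih _ _

-- one pass of the inner loop, index test already replaced by a value test
theorem pv_inner_plain (sought : String) :
    ∀ (L r : List String), r.Nodup →
      L.foldl (fun result t =>
          if t = sought then result
          else if PySem.Str.startswith t sought then
            (if t ∈ result then PySem.Set.discard result t else result)
          else result) r
        = r.filter (fun t => !(decide (t ∈ L) && !(t == sought) && PySem.Str.startswith t sought)) := by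
  intro L
  induction L with
  | nil =>
      intro r _
      simp
  | cons a L ih =>
      intro r hr
      simp only [List.foldl_cons]
      by_cases h1 : a = sought
      · rw [if_pos h1, ih r hr]
        refine List.filter_congr ?_
        intro t _
        by_cases h2 : t = sought
        · simp [h2]
        · simp [List.mem_cons, h1, h2]
      · rw [if_neg h1]
        by_cases h2 : PySem.Str.startswith a sought = true
        · rw [if_pos h2, pv_ite_discard]
          rw [ih (r.filter (fun y => !(y == a))) (hr.filter _)]
          rw [List.filter_filter]
          refine List.filter_congr ?_
          intro t _
          by_cases h3 : t = a
          · subst h3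
            rw [h2]
            simp [h1]
          · simp [List.mem_cons, h3]
        · rw [if_neg h2]
          rw [ih r hr]
          refine List.filter_congr ?_
          intro t _
          by_cases h3 : t = a
          · subst h3
            simp [Bool.not_eq_true] at h2
            simp [h2]
          · simp [List.mem_cons, h3]

-- the inner loop as A writes it (enumerate + index test) equals the value-test pass
theorem pv_inner_enum (S : List String) (hS : S.Nodup) (i : Int) (sought : String)
    (hmem : (i, sought) ∈ PySem.List.enumerate S 0) (r : List String) :
    (PySem.List.enumerate S 0).foldl (fun result q =>
        if q.1 = i then result
        else if PySem.Str.startswith q.2 sought then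
          match PySem.Set.remove? result q.2 with
          | some x => x
          | none => result
        else result) r
      = S.foldl (fun result t =>
          if t = sought then result
          else if PySem.Str.startswith t sought then
            (if t ∈ result then PySem.Set.discard result t else result)
          else result) r := by
  rw [PySem.List.foldl_congr_mem _ _
      (fun result q =>
        if q.2 = sought then result
        else if PySem.Str.startswith q.2 sought then
          (if q.2 ∈ result then PySem.Set.discard result q.2 else result)
        else result) r ?_]
  · exact pv_foldl_enumerate_snd
      (fun result t =>
        if t = sought then result
        else if PySem.Str.startswith t sought then
          (if t ∈ result then PySem.Set.discard result t else result)
        else result) S 0 r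
  · intro acc q hq
    beta_reduce
    have hiff : q.1 = i ↔ q.2 = sought := by
      rcases (PySem.List.mem_enumerate_iff S 0 q).mp hq with ⟨k, hk, hq'⟩
      rcases (PySem.List.mem_enumerate_iff S 0 (i, sought)).mp hmem with ⟨k', hk', hq''⟩
      have h1 : q.1 = (k : Int) := by rw [hq']; simp
      have h2 : q.2 = S[k] := by rw [hq']
      have h3 : i = (k' : Int) := by
        have := congrArg Prod.fst hq''
        simpa using this
      have h4 : sought = S[k'] := by
        have := congrArg Prod.snd hq''
        simpa using this
      rw [h1, h2, h3, h4]
      constructor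
      · intro h; exact (hS.getElem_inj_iff).mpr (by exact_mod_cast h)
      · intro h; exact_mod_cast (hS.getElem_inj_iff).mp h
    by_cases hz : q.1 = i
    · rw [if_pos hz, if_pos (hiff.mp hz)]
    · rw [if_neg hz, if_neg (fun h => hz (hiff.mpr h))]
      by_cases hsw : PySem.Str.startswith q.2 sought = true
      · rw [if_pos hsw, if_pos hsw, pv_rem_eq]
      · rw [if_neg hsw, if_neg hsw]

-- the whole outer loop is a filter by "no other element of S is a prefix"
theorem pv_outer_fold (S : List String) :
    ∀ (outs r : List String), r.Nodup →
      outs.foldl (fun result sought =>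
          S.foldl (fun result t =>
            if t = sought then result
            else if PySem.Str.startswith t sought then
              (if t ∈ result then PySem.Set.discard result t else result)
            else result) result) r
        = r.filter (fun t => outs.all
            (fun sought => !(decide (t ∈ S) && !(t == sought) && PySem.Str.startswith t sought))) := by
  intro outs
  induction outs with
  | nil =>
      intro r _
      simp only [List.foldl_nil, List.all_nil, List.filter_true]
  | cons s outs ih =>
      intro r hr
      simp only [List.foldl_cons]
      rw [pv_inner_plain s S r hr]
      rw [ih _ (hr.filter _)]
      rw [List.filter_filter]
      refine List.filter_congr ?_
      intro t _
      rw [List.all_cons, Bool.and_comm]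

-- A's keep-condition for t ∈ S ("no other s ∈ S with t.startswith(s)") equals
-- B's ("no proper prefix t[:k] is in S")
theorem pv_pred_eq (S : List String) (t : String) (ht : t ∈ S) :
    S.all (fun sought => !(decide (t ∈ S) && !(t == sought) && PySem.Str.startswith t sought))
      = (PySem.List.pyRange 0 (PySem.Str.len t) 1).all
          (fun k => !(PySem.Set.contains S (PySem.Str.slice t none (some k)))) := by
  rw [Bool.eq_iff_iff]
  simp only [List.all_eq_true, Bool.not_eq_eq_eq_not, Bool.not_true, Bool.and_eq_false_iff]
  constructor
  · intro h k hk
    rcases PySem.List.mem_pyRange_one.mp hk with ⟨hk0, hklen⟩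
    have hts : (PySem.Str.slice t none (some k)).toList = t.toList.take k.toNat := by
      rw [PySem.Str.toList_slice, PySem.Chars.slice_eq_listSlice, PySem.List.slice_to _ hk0]
    rw [← Bool.not_eq_true, PySem.Set.contains_iff]
    intro hmem
    rcases h _ hmem with h' | h'
    · rcases h' with h' | h'
      · exact absurd (decide_eq_true ht) (by simp [h'])
      · -- slice t [:k] = t is impossible: k < len t
        have h'' : t = (PySem.Str.slice t none (some k)) := by
          simpa using h'
        have : (PySem.Str.slice t none (some k)) = t := h''.symm
        have hlen : (t.toList.take k.toNat).length = t.toList.length := by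
          rw [← hts, this]
        rw [List.length_take] at hlen
        have : k < (t.toList.length : Int) := by
          have := PySem.Str.len_eq t
          omega
        omega
    · -- but slice IS a prefix of t
      have : PySem.Str.startswith t (PySem.Str.slice t none (some k)) = true := by
        rw [PySem.Str.startswith_eq, PySem.Chars.startswith_iff, hts]
        exact List.take_prefix _ _
      rw [h'] at this
      exact absurd this (by simp)
  · intro h s hs
    by_cases he : s = t
    · left; right; simp [he]
    · by_cases hsw : PySem.Str.startswith t s = true
      · exfalso
        have hpre : s.toList <+: t.toList := by
          rw [PySem.Str.startswith_eq, PySem.Chars.startswith_iff] at hsw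
          exact hsw
        have hle : s.toList.length ≤ t.toList.length := hpre.length_le
        have hne : s.toList.length ≠ t.toList.length := by
          intro hl
          apply he
          apply String.toList_inj.mp
          have := List.prefix_iff_eq_take.mp hpre
          rw [this, hl, List.take_length]
        have hklt : s.toList.length < t.toList.length := lt_of_le_of_ne hle hne
        have hk : ((s.toList.length : Int)) ∈ PySem.List.pyRange 0 (PySem.Str.len t) 1 := by
          refine PySem.List.mem_pyRange_one.mpr ⟨by positivity, ?_⟩
          have := PySem.Str.len_eq t
          omega
        have := h _ hk
        rw [← Bool.not_eq_true, PySem.Set.contains_iff] at this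
        apply this
        have : PySem.Str.slice t none (some (s.toList.length : Int)) = s := by
          apply String.toList_inj.mp
          rw [PySem.Str.toList_slice, PySem.Chars.slice_eq_listSlice,
            PySem.List.slice_to _ (by positivity)]
          simp only [Int.toNat_natCast]
          exact (List.prefix_iff_eq_take.mp hpre).symm
        rw [this]
        exact hs
      · right
        exact Bool.eq_false_iff.mpr hsw

-- ===== VERDICT (by name: the statement is the Claim_ definition above) =====
theorem optimize_remove_list_dir_spec : Claim_equal_optimize_remove_list_dir := by
  intro empty_dirs _
  unfold Spec_optimize_remove_list_dir optimize_remove_list_dir optimize_remove_list_dir_alt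
  have hS : (PySem.Set.ofList empty_dirs : List String).Nodup := PySem.Set.nodup_ofList empty_dirs
  rw [PySem.List.foldl_congr_mem _ _
      (fun result p =>
        (PySem.Set.ofList empty_dirs : List String).foldl (fun result t =>
          if t = p.2 then result
          else if PySem.Str.startswith t p.2 then
            (if t ∈ result then PySem.Set.discard result t else result)
          else result) result) _ ?_]
  · rw [pv_foldl_enumerate_snd
        (fun result sought =>
          (PySem.Set.ofList empty_dirs : List String).foldl (fun result t =>
            if t = sought then result
            else if PySem.Str.startswith t sought then
              (if t ∈ result then PySem.Set.discard result t else result)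
            else result) result)
        (PySem.Set.ofList empty_dirs) 0 (PySem.Set.ofList empty_dirs)]
    rw [pv_outer_fold (PySem.Set.ofList empty_dirs) (PySem.Set.ofList empty_dirs)
        (PySem.Set.ofList empty_dirs) hS]
    exact List.filter_congr (fun t ht => pv_pred_eq (PySem.Set.ofList empty_dirs) t ht)
  · intro acc p hp
    exact pv_inner_enum (PySem.Set.ofList empty_dirs) hS p.1 p.2 (by rwa [Prod.mk.eta]) acc
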